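-- pv_equiv track=rewrite | github.com/ygua699/2021_S1_CS373_Assignment | QRCodeDetection.py | computeVerticalEdgesSobelAbsolute
-- ===== SOURCE A (Python) =====
-- def computeVerticalEdgesSobelAbsolute(pixel_array, image_width, image_height):
--     list1 = [[0 for x in range(image_width)] for y in range(image_height)]
--     lst = [[-1, 0, 1], [-2, 0, 2], [-1, 0, 1]]
--     for i in range(1, image_height - 1):
--         for j in range(1, image_width - 1):
--             r1 = 0
--             num1 = 0
--             for x in range(i - 1, i + 2):
--                 num2 = 0
--                 for y in range(j - 1, j + 2):
--                     r1 += pixel_array[x][y] * lst[num1][num2]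
--                     num2 += 1
--                 num1 += 1
--             list1[i][j] = r1
--     return list1
-- ===== SOURCE B (Python) =====
-- def computeVerticalEdgesSobelAbsolute(pixel_array, image_width, image_height):
--     if image_height < 3 or image_width < 3:
--         return [[0] * image_width for _ in range(image_height)]
--     # separable Sobel: horizontal derivative pass, then vertical smoothing pass
--     h = [[row[j + 1] - row[j - 1] for j in range(1, image_width - 1)]
--          for row in pixel_array[:image_height]]
--     border = [0] * image_width
--     return [border] + [
--         [0] + [h[i - 1][k] + 2 * h[i][k] + h[i + 1][k]
--                for k in range(image_width - 2)] + [0]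
--         for i in range(1, image_height - 1)
--     ] + [border]
-- ===== Notes on version B (the rewrite author's own statement) =====
-- stated objective: alternative
-- what changed: Replaces the per-pixel 3x3 kernel triple loop by a separable two-pass convolution: one pass builds the horizontal derivative row[j+1]-row[j-1], a second pass combines three such rows with weights 1,2,1, building each output row directly instead of mutating a zero grid.
import Mathlib
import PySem

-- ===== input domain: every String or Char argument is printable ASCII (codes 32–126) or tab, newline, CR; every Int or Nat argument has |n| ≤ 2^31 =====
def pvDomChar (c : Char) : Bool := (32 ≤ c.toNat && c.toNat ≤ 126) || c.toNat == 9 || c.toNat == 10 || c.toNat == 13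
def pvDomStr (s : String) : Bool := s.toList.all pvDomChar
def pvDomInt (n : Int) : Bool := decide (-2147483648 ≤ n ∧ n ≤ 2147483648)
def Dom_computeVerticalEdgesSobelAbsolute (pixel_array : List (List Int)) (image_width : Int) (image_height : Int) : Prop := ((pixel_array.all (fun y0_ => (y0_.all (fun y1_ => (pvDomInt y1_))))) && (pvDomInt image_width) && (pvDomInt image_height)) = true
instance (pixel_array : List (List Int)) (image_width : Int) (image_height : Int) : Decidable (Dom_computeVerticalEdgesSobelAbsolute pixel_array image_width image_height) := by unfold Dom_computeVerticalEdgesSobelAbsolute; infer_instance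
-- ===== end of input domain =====

-- B replaces A's per-pixel 3x3 kernel loop by a separable two-pass convolution (a different algorithm computing the same signed Sobel response; fewer operations per pixel, speed not verified).

-- ===== PORT A =====
def sobelKernelA : List (List Int) := [[-1, 0, 1], [-2, 0, 2], [-1, 0, 1]]

-- the innermost two loops of A (accumulating r1 with counters num1, num2)
def sobelCellA (pixel_array : List (List Int)) (i j : Int) : Int :=
  ((PySem.List.pyRange (i - 1) (i + 2) 1).foldl
    (fun (s : Int × Int) (x : Int) =>
      let t := (PySem.List.pyRange (j - 1) (j + 2) 1).foldl
        (fun (t : Int × Int) (y : Int) =>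
          (t.1 + PySem.List.pyGetD (PySem.List.pyGetD pixel_array x []) y 0 *
                 PySem.List.pyGetD (PySem.List.pyGetD sobelKernelA s.2 []) t.2 0,
           t.2 + 1)) (s.1, 0)
      (t.1, s.2 + 1)) (0, 0)).1

def computeVerticalEdgesSobelAbsolute (pixel_array : List (List Int)) (image_width : Int) (image_height : Int) : List (List Int) :=
  let list1 := (PySem.List.pyRange 0 image_height 1).map
    (fun _ => (PySem.List.pyRange 0 image_width 1).map (fun _ => (0 : Int)))
  (PySem.List.pyRange 1 (image_height - 1) 1).foldl (fun g i =>
    (PySem.List.pyRange 1 (image_width - 1) 1).foldl (fun g j =>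
      PySem.List.pySetD g i
        (PySem.List.pySetD (PySem.List.pyGetD g i []) j (sobelCellA pixel_array i j))) g) list1

-- ===== PORT B =====
-- one interior output row: [0] + [h[i-1][k] + 2*h[i][k] + h[i+1][k] for k in range(w-2)] + [0]
def sobelMidRowB (hh : List (List Int)) (image_width : Int) (i : Int) : List Int :=
  0 :: ((PySem.List.pyRange 0 (image_width - 2) 1).map (fun k =>
    PySem.List.pyGetD (PySem.List.pyGetD hh (i - 1) []) k 0 +
    2 * PySem.List.pyGetD (PySem.List.pyGetD hh i []) k 0 +
    PySem.List.pyGetD (PySem.List.pyGetD hh (i + 1) []) k 0)) ++ [0]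

def computeVerticalEdgesSobelAbsolute_alt (pixel_array : List (List Int)) (image_width : Int) (image_height : Int) : List (List Int) :=
  if image_height < 3 ∨ image_width < 3 then
    (PySem.List.pyRange 0 image_height 1).map (fun _ => List.replicate image_width.toNat 0)
  else
    let hh := (PySem.List.slice pixel_array none (some image_height)).map (fun row =>
      (PySem.List.pyRange 1 (image_width - 1) 1).map (fun j =>
        PySem.List.pyGetD row (j + 1) 0 - PySem.List.pyGetD row (j - 1) 0))
    let border := List.replicate image_width.toNat 0
    border :: ((PySem.List.pyRange 1 (image_height - 1) 1).map (sobelMidRowB hh image_width)) ++ [border]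

-- ===== PRECONDITION & SPEC =====
-- Pre_ excludes exactly the inputs where A raises IndexError: when the interior is nonempty
-- (height, width >= 3) A reads every pixel in the first image_height rows and image_width columns.
def Pre_computeVerticalEdgesSobelAbsolute (pixel_array : List (List Int)) (image_width : Int) (image_height : Int) : Prop :=
  3 ≤ image_height → 3 ≤ image_width →
    (image_height ≤ (pixel_array.length : Int) ∧
     ∀ r ∈ pixel_array.take image_height.toNat, image_width ≤ (r.length : Int))
instance (pixel_array : List (List Int)) (image_width : Int) (image_height : Int) : Decidable (Pre_computeVerticalEdgesSobelAbsolute pixel_array image_width image_height) := by unfold Pre_computeVerticalEdgesSobelAbsolute; infer_instance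

def pvWitness_computeVerticalEdgesSobelAbsolute : List (List Int) × Int × Int :=
  ([[1, 2, 3], [4, 5, 6], [7, 8, 9]], 3, 3)

def Spec_computeVerticalEdgesSobelAbsolute (pixel_array : List (List Int)) (image_width : Int) (image_height : Int) (out : List (List Int)) : Prop := out = computeVerticalEdgesSobelAbsolute_alt pixel_array image_width image_height
instance (pixel_array : List (List Int)) (image_width : Int) (image_height : Int) (out : List (List Int)) : Decidable (Spec_computeVerticalEdgesSobelAbsolute pixel_array image_width image_height out) := by unfold Spec_computeVerticalEdgesSobelAbsolute; infer_instance

-- ===== CLAIM (what is proved, stated in full; the proofs are below) =====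
def Claim_equal_computeVerticalEdgesSobelAbsolute : Prop := ∀ (pixel_array : List (List Int)) (image_width : Int) (image_height : Int), Dom_computeVerticalEdgesSobelAbsolute pixel_array image_width image_height → Pre_computeVerticalEdgesSobelAbsolute pixel_array image_width image_height → Spec_computeVerticalEdgesSobelAbsolute pixel_array image_width image_height (computeVerticalEdgesSobelAbsolute pixel_array image_width image_height)

-- ===== LEMMAS AND PROOFS =====

theorem pvZeroRow (w : Int) :
    (PySem.List.pyRange 0 w 1).map (fun _ => (0 : Int)) = List.replicate w.toNat 0 := by
  have := @List.map_const Int Int (PySem.List.pyRange 0 w 1) 0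
  simp only [PySem.List.length_pyRange_one, sub_zero] at this
  exact this

-- a range of three consecutive integers (A's 3x3 kernel window)
theorem pvRangeTriple (a : Int) :
    PySem.List.pyRange (a - 1) (a + 2) 1 = [a - 1, a, a + 1] := by
  rw [PySem.List.pyRange_one_cons (by omega), PySem.List.pyRange_one_cons (by omega),
      PySem.List.pyRange_one_cons (by omega), PySem.List.pyRange_one_eq_nil (by omega)]
  norm_num

-- A's innermost accumulation written as a closed arithmetic expression
theorem pvCellVal (P : List (List Int)) (i j : Int) :
    sobelCellA P i j =
      PySem.List.pyGetD (PySem.List.pyGetD P (i - 1) []) (j + 1) 0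
        - PySem.List.pyGetD (PySem.List.pyGetD P (i - 1) []) (j - 1) 0
        + 2 * (PySem.List.pyGetD (PySem.List.pyGetD P i []) (j + 1) 0
               - PySem.List.pyGetD (PySem.List.pyGetD P i []) (j - 1) 0)
        + (PySem.List.pyGetD (PySem.List.pyGetD P (i + 1) []) (j + 1) 0
           - PySem.List.pyGetD (PySem.List.pyGetD P (i + 1) []) (j - 1) 0) := by
  have kA : PySem.List.pyGetD sobelKernelA 0 [] = [-1, 0, 1] := by decide
  have kB : PySem.List.pyGetD sobelKernelA 1 [] = [-2, 0, 2] := by decide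
  have kC : PySem.List.pyGetD sobelKernelA 2 [] = [-1, 0, 1] := by decide
  have gA0 : PySem.List.pyGetD [(-1 : Int), 0, 1] 0 0 = -1 := by decide
  have gA1 : PySem.List.pyGetD [(-1 : Int), 0, 1] 1 0 = 0 := by decide
  have gA2 : PySem.List.pyGetD [(-1 : Int), 0, 1] 2 0 = 1 := by decide
  have gB0 : PySem.List.pyGetD [(-2 : Int), 0, 2] 0 0 = -2 := by decide
  have gB1 : PySem.List.pyGetD [(-2 : Int), 0, 2] 1 0 = 0 := by decide
  have gB2 : PySem.List.pyGetD [(-2 : Int), 0, 2] 2 0 = 2 := by decide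
  simp only [sobelCellA, pvRangeTriple, List.foldl_cons, List.foldl_nil]
  norm_num [kA, kB, kC, gA0, gA1, gA2, gB0, gB1, gB2]
  ring

-- the inner j-loop of A over one fixed row: element characterisation
theorem pvRowFoldlGet (v : Int → Int) (b : Int) :
    ∀ (n : Nat) (a : Int), 0 ≤ a → (b - a).toNat ≤ n → ∀ (row : List Int) (c : Nat),
      ((PySem.List.pyRange a b 1).foldl (fun r j => PySem.List.pySetD r j (v j)) row)[c]? =
        if a ≤ (c : Int) ∧ (c : Int) < b then row[c]?.map (fun _ => v c) else row[c]? := by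
  intro n
  induction n with
  | zero =>
    intro a ha hn row c
    rw [PySem.List.pyRange_one_eq_nil (by omega)]
    simp only [List.foldl_nil]
    rw [if_neg (by omega)]
  | succ n ih =>
    intro a ha hn row c
    by_cases hab : b ≤ a
    · rw [PySem.List.pyRange_one_eq_nil hab]
      simp only [List.foldl_nil]
      rw [if_neg (by omega)]
    · rw [Int.not_le] at hab
      rw [PySem.List.pyRange_one_cons hab, List.foldl_cons]
      rw [ih (a + 1) (by omega) (by omega)]
      rw [PySem.List.pySetD_of_nonneg _ _ ha]
      by_cases hca : c = a.toNat
      · subst hca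
        have hac : (a.toNat : Int) = a := Int.toNat_of_nonneg ha
        rw [if_neg (by omega), if_pos (by omega)]
        rw [List.getElem?_set, if_pos rfl]
        by_cases hlen : a.toNat < row.length
        · rw [if_pos hlen]
          rw [List.getElem?_eq_getElem hlen]
          simp [hac]
        · rw [if_neg hlen]
          rw [List.getElem?_eq_none_iff.mpr (by omega)]
          rfl
      · have hset : (row.set a.toNat (v a))[c]? = row[c]? := by
          rw [List.getElem?_set, if_neg (by omega)]
        rw [hset]
        by_cases h1 : a + 1 ≤ (c : Int) ∧ (c : Int) < b
        · rw [if_pos h1, if_pos (by omega)]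
        · rw [if_neg h1]
          by_cases h2 : a ≤ (c : Int) ∧ (c : Int) < b
          · exfalso; omega
          · rw [if_neg h2]

-- A's grid-level inner loop equals a row-level loop re-inserted with set
theorem pvInnerAsRow (cell : Int → Int) (i b : Int) (hi : 0 ≤ i) :
    ∀ (n : Nat) (a : Int), (b - a).toNat ≤ n → ∀ (g : List (List Int)),
      ((PySem.List.pyRange a b 1).foldl (fun g j =>
          PySem.List.pySetD g i
            (PySem.List.pySetD (PySem.List.pyGetD g i []) j (cell j))) g) =
        PySem.List.pySetD g i
          ((PySem.List.pyRange a b 1).foldl (fun r j => PySem.List.pySetD r j (cell j))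
            (PySem.List.pyGetD g i [])) := by
  intro n
  induction n with
  | zero =>
    intro a hn g
    rw [PySem.List.pyRange_one_eq_nil (by omega)]
    simp only [List.foldl_nil]
    rw [PySem.List.pySetD_of_nonneg _ _ hi, PySem.List.pyGetD_of_nonneg _ _ hi]
    by_cases hlen : i.toNat < g.length
    · rw [List.getD_eq_getElem?_getD, List.getElem?_eq_getElem hlen]
      simp [List.set_getElem_self]
    · rw [List.set_eq_of_length_le (by omega)]
  | succ n ih =>
    intro a hn g
    by_cases hab : b ≤ a
    · rw [PySem.List.pyRange_one_eq_nil hab]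
      simp only [List.foldl_nil]
      rw [PySem.List.pySetD_of_nonneg _ _ hi, PySem.List.pyGetD_of_nonneg _ _ hi]
      by_cases hlen : i.toNat < g.length
      · rw [List.getD_eq_getElem?_getD, List.getElem?_eq_getElem hlen]
        simp [List.set_getElem_self]
      · rw [List.set_eq_of_length_le (by omega)]
    · rw [Int.not_le] at hab
      rw [PySem.List.pyRange_one_cons hab, List.foldl_cons, List.foldl_cons]
      rw [ih (a + 1) (by omega)]
      rw [PySem.List.pySetD_of_nonneg _ _ hi, PySem.List.pySetD_of_nonneg _ _ hi,
          PySem.List.pySetD_of_nonneg _ _ hi,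
          PySem.List.pyGetD_of_nonneg _ _ hi, PySem.List.pyGetD_of_nonneg _ _ hi]
      by_cases hlen : i.toNat < g.length
      · have hgd : ∀ (X : List Int), (g.set i.toNat X).getD i.toNat [] = X := by
          intro X
          rw [List.getD_eq_getElem?_getD, List.getElem?_set]
          simp [hlen]
        rw [hgd, List.set_set]
      · have h1 : ∀ (X : List Int), g.set i.toNat X = g := by
          intro X; exact List.set_eq_of_length_le (by omega)
        simp only [h1]

-- the outer i-loop of A: element characterisation of a fold of row updates
theorem pvOuterFoldlGet (F : Int → List Int → List Int) (b : Int) :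
    ∀ (n : Nat) (a : Int), 0 ≤ a → (b - a).toNat ≤ n → ∀ (g : List (List Int)) (r : Nat),
      ((PySem.List.pyRange a b 1).foldl (fun g i =>
          PySem.List.pySetD g i (F i (PySem.List.pyGetD g i []))) g)[r]? =
        if a ≤ (r : Int) ∧ (r : Int) < b then g[r]?.map (F r) else g[r]? := by
  intro n
  induction n with
  | zero =>
    intro a ha hn g r
    rw [PySem.List.pyRange_one_eq_nil (by omega)]
    simp only [List.foldl_nil]
    rw [if_neg (by omega)]
  | succ n ih =>
    intro a ha hn g r
    by_cases hab : b ≤ a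
    · rw [PySem.List.pyRange_one_eq_nil hab]
      simp only [List.foldl_nil]
      rw [if_neg (by omega)]
    · rw [Int.not_le] at hab
      rw [PySem.List.pyRange_one_cons hab, List.foldl_cons]
      rw [ih (a + 1) (by omega) (by omega)]
      rw [PySem.List.pySetD_of_nonneg _ _ ha, PySem.List.pyGetD_of_nonneg _ _ ha]
      by_cases hca : r = a.toNat
      · subst hca
        have hac : (a.toNat : Int) = a := Int.toNat_of_nonneg ha
        rw [if_neg (by omega), if_pos (by omega)]
        rw [List.getElem?_set, if_pos rfl]
        by_cases hlen : a.toNat < g.length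
        · rw [if_pos hlen, List.getD_eq_getElem?_getD, List.getElem?_eq_getElem hlen]
          simp [hac]
        · rw [if_neg hlen]
          rw [List.getElem?_eq_none_iff.mpr (by omega)]
          rfl
      · have hset : (g.set a.toNat (F a (g.getD a.toNat [])))[r]? = g[r]? := by
          rw [List.getElem?_set, if_neg (by omega)]
        rw [hset]
        by_cases h1 : a + 1 ≤ (r : Int) ∧ (r : Int) < b
        · rw [if_pos h1, if_pos (by omega)]
        · rw [if_neg h1]
          by_cases h2 : a ≤ (r : Int) ∧ (r : Int) < b
          · exfalso; omega
          · rw [if_neg h2]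

-- B's first pass evaluated at one cell, in terms of the pixel array
theorem pvHHval (P : List (List Int)) (w h x k : Int)
    (hx0 : 0 ≤ x) (hxh : x < h) (hxP : x < (P.length : Int))
    (hk0 : 0 ≤ k) (hkw : k < w - 2) :
    PySem.List.pyGetD
      (PySem.List.pyGetD
        ((PySem.List.slice P none (some h)).map (fun row =>
          (PySem.List.pyRange 1 (w - 1) 1).map (fun j =>
            PySem.List.pyGetD row (j + 1) 0 - PySem.List.pyGetD row (j - 1) 0))) x []) k 0
    = PySem.List.pyGetD (PySem.List.pyGetD P x []) (k + 2) 0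
      - PySem.List.pyGetD (PySem.List.pyGetD P x []) k 0 := by
  have hxlen : x.toNat < P.length := by omega
  rw [PySem.List.slice_to P (show (0:Int) ≤ h by omega)]
  rw [PySem.List.pyGetD_of_nonneg _ _ hx0, PySem.List.pyGetD_of_nonneg _ _ hx0]
  rw [List.getD_eq_getElem?_getD, List.getElem?_map, List.getElem?_take,
      if_pos (by omega), List.getElem?_eq_getElem hxlen]
  simp only [Option.map_some, Option.getD_some]
  rw [List.getD_eq_getElem?_getD, List.getElem?_eq_getElem hxlen, Option.getD_some]
  rw [PySem.List.pyGetD_of_nonneg _ _ hk0]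
  rw [List.getD_eq_getElem?_getD, List.getElem?_map, PySem.List.getElem?_pyRange_one,
      if_pos (by omega)]
  simp only [Option.map_some, Option.getD_some]
  have h1 : (1 : Int) + (k.toNat : Int) + 1 = k + 2 := by omega
  have h2 : (1 : Int) + (k.toNat : Int) - 1 = k := by omega
  rw [h1, h2]

-- one interior row: A's row loop over a zero row equals B's assembled row
theorem pvInteriorRow (P : List (List Int)) (w h : Int) (hw3 : 3 ≤ w) (_hh3 : 3 ≤ h)
    (hlenP : h ≤ (P.length : Int)) (i : Int) (hi1 : 1 ≤ i) (hi2 : i < h - 1) :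
    (PySem.List.pyRange 1 (w - 1) 1).foldl (fun r j => PySem.List.pySetD r j (sobelCellA P i j))
        ((PySem.List.pyRange 0 w 1).map (fun _ => (0 : Int)))
      = sobelMidRowB ((PySem.List.slice P none (some h)).map (fun row =>
          (PySem.List.pyRange 1 (w - 1) 1).map (fun j =>
            PySem.List.pyGetD row (j + 1) 0 - PySem.List.pyGetD row (j - 1) 0))) w i := by
  have hZrow : ∀ cc : Nat,
      ((PySem.List.pyRange 0 w 1).map (fun _ => (0 : Int)))[cc]? =
        if cc < w.toNat then some (0 : Int) else none := by
    intro cc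
    rw [List.getElem?_map, PySem.List.getElem?_pyRange_one]
    by_cases hcc : cc < w.toNat
    · rw [if_pos (by omega), if_pos hcc]; rfl
    · rw [if_neg (by omega), if_neg hcc]; rfl
  apply List.ext_getElem?
  intro c
  rw [pvRowFoldlGet (fun j => sobelCellA P i j) (w - 1) (w - 2).toNat 1 (by omega) (by omega)]
  unfold sobelMidRowB
  cases c with
  | zero =>
    rw [if_neg (by omega), hZrow 0, if_pos (by omega)]
    rw [List.getElem?_append, if_pos (by simp), List.getElem?_cons_zero]
  | succ c' =>
    by_cases hc1 : c' < (w - 2).toNat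
    · rw [if_pos (by omega), hZrow (c' + 1), if_pos (by omega)]
      simp only [Option.map_some]
      rw [List.getElem?_append,
          if_pos (by simp only [List.length_cons, List.length_map,
                                PySem.List.length_pyRange_one, sub_zero]; omega),
          List.getElem?_cons_succ, List.getElem?_map, PySem.List.getElem?_pyRange_one,
          if_pos (by omega)]
      simp only [Option.map_some, zero_add]
      congr 1
      rw [pvCellVal]
      rw [pvHHval P w h (i - 1) c' (by omega) (by omega) (by omega) (by omega) (by omega),
          pvHHval P w h i c' (by omega) (by omega) (by omega) (by omega) (by omega),
          pvHHval P w h (i + 1) c' (by omega) (by omega) (by omega) (by omega) (by omega)]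
      have e2 : ((c' + 1 : Nat) : Int) - 1 = (c' : Int) := by push_cast; ring
      have e3 : ((c' + 1 : Nat) : Int) + 1 = (c' : Int) + 2 := by push_cast; ring
      rw [e2, e3]
    · by_cases hc2 : c' = (w - 2).toNat
      · rw [if_neg (by omega), hZrow (c' + 1), if_pos (by omega)]
        rw [List.getElem?_append,
            if_neg (by simp only [List.length_cons, List.length_map,
                                  PySem.List.length_pyRange_one, sub_zero]; omega)]
        simp only [List.length_cons, List.length_map, PySem.List.length_pyRange_one, sub_zero]
        rw [(by omega : c' + 1 - ((w - 2).toNat + 1) = 0), List.getElem?_cons_zero]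
      · rw [if_neg (by omega), hZrow (c' + 1), if_neg (by omega)]
        symm
        rw [List.getElem?_eq_none_iff]
        simp only [List.length_append, List.length_cons, List.length_map,
                   PySem.List.length_pyRange_one, List.length_nil, sub_zero]
        omega

-- ===== VERDICT (by name: the statement is the Claim_ definition above) =====
theorem computeVerticalEdgesSobelAbsolute_spec : Claim_equal_computeVerticalEdgesSobelAbsolute := by
  intro P w h _hdom hpre
  unfold Spec_computeVerticalEdgesSobelAbsolute
  by_cases hsmall : h < 3 ∨ w < 3
  · simp only [computeVerticalEdgesSobelAbsolute, computeVerticalEdgesSobelAbsolute_alt,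
               if_pos hsmall]
    rcases Int.lt_or_le h 3 with hh3 | hh3
    · rw [PySem.List.pyRange_one_eq_nil (show h - 1 ≤ 1 by omega)]
      simp only [List.foldl_nil, pvZeroRow]
    · have hw3 : w < 3 := by rcases hsmall with h1 | h1 <;> omega
      simp only [PySem.List.pyRange_one_eq_nil (show w - 1 ≤ 1 by omega), List.foldl_nil,
                 List.foldl_fixed, pvZeroRow]
  · have hw3 : 3 ≤ w := by by_contra hc; exact hsmall (Or.inr (by omega))
    have hh3 : 3 ≤ h := by by_contra hc; exact hsmall (Or.inl (by omega))
    obtain ⟨hlenP, -⟩ := hpre hh3 hw3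
    simp only [computeVerticalEdgesSobelAbsolute, computeVerticalEdgesSobelAbsolute_alt,
               if_neg hsmall]
    rw [PySem.List.foldl_congr_mem _ _
          (fun g i => PySem.List.pySetD g i
            ((PySem.List.pyRange 1 (w - 1) 1).foldl
              (fun r j => PySem.List.pySetD r j (sobelCellA P i j))
              (PySem.List.pyGetD g i []))) _
          (by
            intro acc x hx
            have hx1 : 1 ≤ x := (PySem.List.mem_pyRange_one.mp hx).1
            exact pvInnerAsRow (fun j => sobelCellA P x j) x (w - 1) (by omega)
              (w - 2).toNat 1 (by omega) acc)]
    apply List.ext_getElem?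
    intro r
    rw [pvOuterFoldlGet
          (fun i row => (PySem.List.pyRange 1 (w - 1) 1).foldl
            (fun rr j => PySem.List.pySetD rr j (sobelCellA P i j)) row)
          (h - 1) (h - 2).toNat 1 (by omega) (by omega)]
    have hZ : ∀ rr : Nat,
        ((PySem.List.pyRange 0 h 1).map
          (fun _ => (PySem.List.pyRange 0 w 1).map (fun _ => (0 : Int))))[rr]? =
          if rr < h.toNat then some ((PySem.List.pyRange 0 w 1).map (fun _ => (0 : Int)))
          else none := by
      intro rr
      rw [List.getElem?_map, PySem.List.getElem?_pyRange_one]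
      by_cases hrr : rr < h.toNat
      · rw [if_pos (by omega), if_pos hrr]; rfl
      · rw [if_neg (by omega), if_neg hrr]; rfl
    cases r with
    | zero =>
      rw [if_neg (by omega), hZ 0, if_pos (by omega), pvZeroRow]
      rw [List.getElem?_append, if_pos (by simp), List.getElem?_cons_zero]
    | succ r' =>
      by_cases hr1 : r' < (h - 1 - 1).toNat
      · rw [if_pos (by omega), hZ (r' + 1), if_pos (by omega)]
        simp only [Option.map_some]
        rw [List.getElem?_append,
            if_pos (by simp only [List.length_cons, List.length_map,
                                  PySem.List.length_pyRange_one]; omega),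
            List.getElem?_cons_succ, List.getElem?_map, PySem.List.getElem?_pyRange_one,
            if_pos hr1]
        congr 1
        have e1 : (1 : Int) + (r' : Int) = ((r' + 1 : Nat) : Int) := by push_cast; ring
        rw [e1]
        exact pvInteriorRow P w h hw3 hh3 hlenP ((r' + 1 : Nat) : Int) (by omega) (by omega)
      · by_cases hr2 : r' = (h - 1 - 1).toNat
        · rw [if_neg (by omega), hZ (r' + 1), if_pos (by omega), pvZeroRow]
          rw [List.getElem?_append,
              if_neg (by simp only [List.length_cons, List.length_map,
                                    PySem.List.length_pyRange_one]; omega)]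
          simp only [List.length_cons, List.length_map, PySem.List.length_pyRange_one]
          rw [(by omega : r' + 1 - ((h - 1 - 1).toNat + 1) = 0), List.getElem?_cons_zero]
        · rw [if_neg (by omega), hZ (r' + 1), if_neg (by omega)]
          symm
          rw [List.getElem?_eq_none_iff]
          simp only [List.length_append, List.length_cons, List.length_map,
                     PySem.List.length_pyRange_one, List.length_nil]
          omega
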